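-- pv_equiv track=rewrite | github.com/0x3EFFFC8/Uva-Solutions | Problem Solving Paradigms/Dynamic Programming/12563.py | phiMem
-- ===== SOURCE A (Python) =====
-- def phiMem(n,t,lengths,memo):
--     ans = songs = r1 = s1 = r2 = s2 = 0
--     if (n,t) in memo: ans, songs = memo[(n,t)]
--     elif n > 0:
--         if lengths[n-1] < t:
--             r2, s2 = phiMem(n-1,t-lengths[n-1],lengths,memo)
--             r2, s2 = r2+lengths[n-1], s2+1
--         r1, s1 = phiMem(n-1,t,lengths,memo)
--         if s2 > s1:  ans, songs = r2, s2
--         elif s2 == s1 and r2 >= r1: ans, songs = r2, s2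
--         else: ans, songs = r1, s1
--         memo[(n,t)] = (ans,songs)
--     return ans, songs
-- ===== SOURCE B (Python) =====
-- def phiMem(n, t, lengths, memo):
--     # Level-synchronous DP: recurse once per level over a whole frontier of
--     # time values, keeping only a rolling {time: (duration, songs)} dict per
--     # level; the input memo is consulted read-only (A mutates it; B does not).
--     if (n, t) in memo:
--         return memo[(n, t)]
--     if n <= 0:
--         return (0, 0)
--
--     def solve(i, frontier):
--         # values for the non-memoized cells `frontier` at level i (i >= 1)
--         if i == 0:
--             return {}
--         L = lengths[i - 1]
--         below = set()
--         for time in frontier: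
--             for child in ((time, time - L) if L < time else (time,)):
--                 if i - 1 >= 1 and (i - 1, child) not in memo:
--                     below.add(child)
--         prev = solve(i - 1, below)
--
--         def get(tm):
--             if (i - 1, tm) in memo:
--                 return memo[(i - 1, tm)]
--             if i - 1 == 0:
--                 return (0, 0)
--             return prev[tm]
--
--         cur = {}
--         for time in frontier:
--             skip = get(time)
--             if L < time:
--                 d, s = get(time - L)
--                 take = (d + L, s + 1)
--             else:
--                 take = (0, 0)
--             cur[time] = take if (take[1], take[0]) >= (skip[1], skip[0]) else skip
--         return cur
--
--     return solve(n, {t})[t]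
-- ===== Notes on version B (the rewrite author's own statement) =====
-- stated objective: alternative
-- what changed: Replaces A's per-cell memoized recursion that mutates the shared memo dict with a level-synchronous DP: one recursive descent per item level over a whole frontier set of time values, keeping only a rolling {time: (duration, songs)} dict per level and reading the input memo without mutating it (return-value equivalence; A additionally mutates memo in place).
import Mathlib
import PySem

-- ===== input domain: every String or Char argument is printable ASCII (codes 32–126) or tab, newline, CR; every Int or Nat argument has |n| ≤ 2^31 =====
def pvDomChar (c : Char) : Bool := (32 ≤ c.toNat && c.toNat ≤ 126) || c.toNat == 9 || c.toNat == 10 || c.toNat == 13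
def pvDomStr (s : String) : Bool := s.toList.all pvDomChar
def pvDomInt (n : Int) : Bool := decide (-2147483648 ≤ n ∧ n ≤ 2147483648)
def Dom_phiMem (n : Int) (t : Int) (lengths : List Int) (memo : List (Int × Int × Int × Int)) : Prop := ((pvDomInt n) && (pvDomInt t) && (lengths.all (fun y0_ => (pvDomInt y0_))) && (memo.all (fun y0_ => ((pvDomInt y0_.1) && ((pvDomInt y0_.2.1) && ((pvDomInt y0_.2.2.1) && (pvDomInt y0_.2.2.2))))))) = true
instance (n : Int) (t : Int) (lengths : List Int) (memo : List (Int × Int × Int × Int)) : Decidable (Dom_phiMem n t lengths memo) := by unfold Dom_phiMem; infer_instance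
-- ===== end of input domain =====

-- B is a level-synchronous frontier DP over read-only memo (alternative decomposition, same cost);
-- equivalence is about the RETURN value only: Python A mutates its memo dict in place, B does not.

-- shared: the Python `memo` dict, built from the association list (key (n,t), value (ans,songs))
def phiMemoDict (memo : List (Int × Int × Int × Int)) : PySem.Dict (Int × Int) (Int × Int) :=
  PySem.Dict.ofList (memo.map (fun q => ((q.1, q.2.1), (q.2.2.1, q.2.2.2))))

-- ===== PORT A =====
-- A's memoized recursion; the mutated memo dict is threaded through as state.
def phiMemGo (lengths : List Int) (n t : Int) (m : PySem.Dict (Int × Int) (Int × Int)) :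
    (Int × Int) × PySem.Dict (Int × Int) (Int × Int) :=
  match m.get? (n, t) with
  | some v => (v, m)
  | none =>
    if h : 0 < n then
      -- lengths[n-1]: in range whenever Pre_ holds; getD 0 is a totalizing guard (Python raises there)
      let L := (PySem.List.pyGet? lengths (n - 1)).getD 0
      let s2 :=
        if L < t then
          let r := phiMemGo lengths (n - 1) (t - L) m
          ((r.1.1 + L, r.1.2 + 1), r.2)
        else ((0, 0), m)
      let r1 := phiMemGo lengths (n - 1) t s2.2
      let res :=
        if s2.1.2 > r1.1.2 then s2.1
        else if s2.1.2 = r1.1.2 ∧ s2.1.1 ≥ r1.1.1 then s2.1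
        else r1.1
      (res, r1.2.insert (n, t) res)
    else ((0, 0), m)
termination_by n.toNat
decreasing_by all_goals omega

def phiMem (n : Int) (t : Int) (lengths : List Int) (memo : List (Int × Int × Int × Int)) : Int × Int :=
  (phiMemGo lengths n t (phiMemoDict memo)).1

-- ===== PORT B =====
-- the two children a frontier cell needs from the level below
def phiChildren (L time : Int) : List Int := if L < time then [time, time - L] else [time]

-- `below`: the non-memoized cells needed at level i-1
def phiBelow (base : PySem.Dict (Int × Int) (Int × Int)) (i L : Int) (frontier : PySem.Set Int) :
    PySem.Set Int :=
  frontier.foldl (fun acc time =>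
    (phiChildren L time).foldl (fun acc c =>
      if 1 ≤ i - 1 ∧ base.get? (i - 1, c) = none then PySem.Set.add acc c else acc) acc)
    PySem.Set.empty

-- `get`: value of cell (i-1, tm): memo, level 0, or the rolling dict of the level below
def phiGetv (base : PySem.Dict (Int × Int) (Int × Int)) (prev : PySem.Dict Int (Int × Int))
    (i tm : Int) : Int × Int :=
  match base.get? (i - 1, tm) with
  | some v => v
  | none => if i - 1 = 0 then (0, 0) else prev.getD tm (0, 0)

-- `solve`: one recursion per LEVEL, producing the rolling {time: (dur, songs)} dict for that level
def phiSolve (base : PySem.Dict (Int × Int) (Int × Int)) (lengths : List Int) :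
    Nat → PySem.Set Int → PySem.Dict Int (Int × Int)
  | 0, _ => PySem.Dict.empty
  | k + 1, frontier =>
    let i : Int := (k + 1 : Nat)
    let L := (PySem.List.pyGet? lengths (i - 1)).getD 0
    let prev := phiSolve base lengths k (phiBelow base i L frontier)
    frontier.foldl (fun cur time =>
      let skip := phiGetv base prev i time
      let take :=
        if L < time then
          let ds := phiGetv base prev i (time - L)
          (ds.1 + L, ds.2 + 1)
        else (0, 0)
      cur.insert time
        (if take.2 > skip.2 ∨ (take.2 = skip.2 ∧ take.1 ≥ skip.1) then take else skip))
      PySem.Dict.empty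

def phiMem_alt (n : Int) (t : Int) (lengths : List Int) (memo : List (Int × Int × Int × Int)) : Int × Int :=
  let base := phiMemoDict memo
  match base.get? (n, t) with
  | some v => v
  | none =>
    if n ≤ 0 then (0, 0)
    else (phiSolve base lengths n.toNat (PySem.Set.add PySem.Set.empty t)).getD t (0, 0)

-- ===== PRECONDITION & SPEC =====
-- Pre_ excludes exactly the inputs where Python A raises (IndexError: n exceeds len(lengths)
-- and (n,t) is not in memo, so lengths[n-1] is evaluated out of range).
def Pre_phiMem (n : Int) (t : Int) (lengths : List Int) (memo : List (Int × Int × Int × Int)) : Prop :=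
  n ≤ lengths.length ∨ ((phiMemoDict memo).get? (n, t)).isSome = true
instance (n : Int) (t : Int) (lengths : List Int) (memo : List (Int × Int × Int × Int)) : Decidable (Pre_phiMem n t lengths memo) := by unfold Pre_phiMem; infer_instance
def pvWitness_phiMem : Int × Int × List Int × (List (Int × Int × Int × Int)) := (2, 10, [3, 5], [])

def Spec_phiMem (n : Int) (t : Int) (lengths : List Int) (memo : List (Int × Int × Int × Int)) (out : Int × Int) : Prop := out = phiMem_alt n t lengths memo
instance (n : Int) (t : Int) (lengths : List Int) (memo : List (Int × Int × Int × Int)) (out : Int × Int) : Decidable (Spec_phiMem n t lengths memo out) := by unfold Spec_phiMem; infer_instance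

-- ===== CLAIM (what is proved, stated in full; the proofs are below) =====
def Claim_equal_phiMem : Prop := ∀ (n : Int) (t : Int) (lengths : List Int) (memo : List (Int × Int × Int × Int)), Dom_phiMem n t lengths memo → Pre_phiMem n t lengths memo → Spec_phiMem n t lengths memo (phiMem n t lengths memo)

-- ===== LEMMAS AND PROOFS =====

-- pure reference function: the value A computes, defined w.r.t. the ORIGINAL memo `base`
def fpure (base : PySem.Dict (Int × Int) (Int × Int)) (lengths : List Int) (n t : Int) : Int × Int :=
  match base.get? (n, t) with
  | some v => v
  | none =>
    if h : 0 < n then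
      let L := (PySem.List.pyGet? lengths (n - 1)).getD 0
      let p2 :=
        if L < t then
          let r := fpure base lengths (n - 1) (t - L)
          (r.1 + L, r.2 + 1)
        else (0, 0)
      let r1 := fpure base lengths (n - 1) t
      if p2.2 > r1.2 then p2
      else if p2.2 = r1.2 ∧ p2.1 ≥ r1.1 then p2
      else r1
    else (0, 0)
termination_by n.toNat
decreasing_by all_goals omega


-- conditional Set.add loop: membership and nodup
theorem mem_foldl_addIf (P : Int → Prop) [DecidablePred P] :
    ∀ (l acc : List Int) (x : Int),
      x ∈ l.foldl (fun a c => if P c then PySem.Set.add a c else a) acc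
        ↔ x ∈ acc ∨ (x ∈ l ∧ P x) := by
  intro l
  induction l with
  | nil => simp
  | cons c l ih =>
    intro acc x
    simp only [List.foldl_cons, ih]
    by_cases hPc : P c
    · simp only [if_pos hPc, PySem.Set.mem_add, List.mem_cons]
      constructor
      · rintro ((h | rfl) | h) <;> tauto
      · rintro (h | ⟨(rfl | h), hp⟩) <;> tauto
    · simp only [if_neg hPc, List.mem_cons]
      constructor
      · rintro (h | h) <;> tauto
      · rintro (h | ⟨(rfl | h), hp⟩) <;> tauto

theorem nodup_foldl_addIf (P : Int → Prop) [DecidablePred P] :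
    ∀ (l acc : List Int), acc.Nodup →
      (l.foldl (fun a c => if P c then PySem.Set.add a c else a) acc).Nodup := by
  intro l
  induction l with
  | nil => simp
  | cons c l ih =>
    intro acc hacc
    simp only [List.foldl_cons]
    apply ih
    by_cases hPc : P c
    · simp only [if_pos hPc]
      exact PySem.Set.nodup_add acc c hacc
    · simpa [if_neg hPc] using hacc

theorem mem_phiBelow (base : PySem.Dict (Int × Int) (Int × Int)) (i L : Int)
    (fr : PySem.Set Int) (x : Int) :
    x ∈ phiBelow base i L fr
      ↔ (∃ time ∈ fr, x ∈ phiChildren L time) ∧ (1 ≤ i - 1 ∧ base.get? (i - 1, x) = none) := by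
  have aux : ∀ (l acc : List Int),
      x ∈ l.foldl (fun acc time =>
          (phiChildren L time).foldl (fun acc c =>
            if 1 ≤ i - 1 ∧ base.get? (i - 1, c) = none then PySem.Set.add acc c else acc) acc) acc
        ↔ x ∈ acc ∨ ((∃ time ∈ l, x ∈ phiChildren L time) ∧ (1 ≤ i - 1 ∧ base.get? (i - 1, x) = none)) := by
    intro l
    induction l with
    | nil => simp
    | cons c l ih =>
      intro acc
      simp only [List.foldl_cons, ih,
        mem_foldl_addIf (fun c => 1 ≤ i - 1 ∧ base.get? (i - 1, c) = none), List.mem_cons]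
      constructor
      · rintro ((h | h) | h)
        · tauto
        · exact Or.inr ⟨⟨c, Or.inl rfl, h.1⟩, h.2⟩
        · obtain ⟨⟨tm, htm, hch⟩, hp⟩ := h
          exact Or.inr ⟨⟨tm, Or.inr htm, hch⟩, hp⟩
      · rintro (h | ⟨⟨tm, (rfl | htm), hch⟩, hp⟩)
        · tauto
        · exact Or.inl (Or.inr ⟨hch, hp⟩)
        · exact Or.inr ⟨⟨tm, htm, hch⟩, hp⟩
  simpa [phiBelow] using aux fr PySem.Set.empty

theorem nodup_phiBelow (base : PySem.Dict (Int × Int) (Int × Int)) (i L : Int)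
    (fr : PySem.Set Int) : (phiBelow base i L fr).Nodup := by
  have aux : ∀ (l acc : List Int), acc.Nodup →
      (l.foldl (fun acc time =>
          (phiChildren L time).foldl (fun acc c =>
            if 1 ≤ i - 1 ∧ base.get? (i - 1, c) = none then PySem.Set.add acc c else acc) acc) acc).Nodup := by
    intro l
    induction l with
    | nil => simp
    | cons c l ih =>
      intro acc hacc
      exact ih _ (nodup_foldl_addIf _ _ _ hacc)
  simpa [phiBelow] using aux fr PySem.Set.empty List.nodup_nil

-- fold of inserts at distinct keys: lookups
theorem get?_foldl_insertF_not_mem (F : Int → Int × Int) :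
    ∀ (l : List Int) (d : PySem.Dict Int (Int × Int)) (tm : Int), tm ∉ l →
      (l.foldl (fun d x => d.insert x (F x)) d).get? tm = d.get? tm := by
  intro l
  induction l with
  | nil => simp
  | cons c l ih =>
    intro d tm h
    simp only [List.mem_cons, not_or] at h
    simp only [List.foldl_cons, ih _ _ h.2, PySem.Dict.get?_insert_of_ne d (F c) h.1]

theorem get?_foldl_insertF_mem (F : Int → Int × Int) :
    ∀ (l : List Int), l.Nodup → ∀ (d : PySem.Dict Int (Int × Int)) (tm : Int), tm ∈ l →
      (l.foldl (fun d x => d.insert x (F x)) d).get? tm = some (F tm) := by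
  intro l
  induction l with
  | nil => simp
  | cons c l ih =>
    intro hn d tm h
    simp only [List.nodup_cons] at hn
    rcases List.mem_cons.mp h with rfl | h
    · simp only [List.foldl_cons, get?_foldl_insertF_not_mem F l _ tm hn.1,
        PySem.Dict.get?_insert_self]
    · simp only [List.foldl_cons]
      exact ih hn.2 _ tm h

-- fpure unfolding lemmas
theorem fpure_of_some {base : PySem.Dict (Int × Int) (Int × Int)} {lengths : List Int} {n t : Int}
    {v : Int × Int} (hb : base.get? (n, t) = some v) : fpure base lengths n t = v := by
  rw [fpure]; simp [hb]

theorem fpure_of_none_nonpos {base : PySem.Dict (Int × Int) (Int × Int)} {lengths : List Int}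
    {n t : Int} (hb : base.get? (n, t) = none) (hn : ¬ 0 < n) : fpure base lengths n t = (0, 0) := by
  rw [fpure]; simp [hb, hn]

theorem fpure_rec {base : PySem.Dict (Int × Int) (Int × Int)} {lengths : List Int} {n t : Int}
    (hb : base.get? (n, t) = none) (hn : 0 < n) :
    fpure base lengths n t =
      (let L := (PySem.List.pyGet? lengths (n - 1)).getD 0
       let p2 := if L < t then
           ((fpure base lengths (n - 1) (t - L)).1 + L, (fpure base lengths (n - 1) (t - L)).2 + 1)
         else (0, 0)
       let r1 := fpure base lengths (n - 1) t
       if p2.2 > r1.2 then p2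
       else if p2.2 = r1.2 ∧ p2.1 ≥ r1.1 then p2
       else r1) := by
  rw [fpure]; simp [hb, hn]

-- B's `get`: agrees with fpure at the level below when prev covers the non-memoized cells
theorem phiGetv_eq_fpure (base : PySem.Dict (Int × Int) (Int × Int)) (lengths : List Int)
    (prev : PySem.Dict Int (Int × Int)) (i c : Int)
    (hprev : i - 1 ≠ 0 → base.get? (i - 1, c) = none →
      prev.get? c = some (fpure base lengths (i - 1) c)) :
    phiGetv base prev i c = fpure base lengths (i - 1) c := by
  unfold phiGetv
  cases hb : base.get? (i - 1, c) with
  | some v => rw [fpure_of_some hb]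
  | none =>
    by_cases h0 : i - 1 = 0
    · rw [if_pos h0, fpure_of_none_nonpos hb (by omega)]
    · rw [if_neg h0, PySem.Dict.getD_eq_get?_getD, hprev h0 hb]; rfl

-- one level of B's tabulation, as a named function (proof-side restatement of phiSolve's body)
def phiStep (base : PySem.Dict (Int × Int) (Int × Int)) (lengths : List Int) (k : Nat)
    (fr : PySem.Set Int) (time : Int) : Int × Int :=
  let i : Int := ((k + 1 : Nat) : Int)
  let L := (PySem.List.pyGet? lengths (i - 1)).getD 0
  let prev := phiSolve base lengths k (phiBelow base i L fr)
  let skip := phiGetv base prev i time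
  let take :=
    if L < time then
      let ds := phiGetv base prev i (time - L)
      (ds.1 + L, ds.2 + 1)
    else (0, 0)
  if take.2 > skip.2 ∨ (take.2 = skip.2 ∧ take.1 ≥ skip.1) then take else skip

theorem phiSolve_succ (base : PySem.Dict (Int × Int) (Int × Int)) (lengths : List Int) (k : Nat)
    (fr : PySem.Set Int) :
    phiSolve base lengths (k + 1) fr =
      fr.foldl (fun cur time => cur.insert time (phiStep base lengths k fr time))
        PySem.Dict.empty := rfl

theorem phiSolve_correct (base : PySem.Dict (Int × Int) (Int × Int)) (lengths : List Int) :
    ∀ (k : Nat) (fr : PySem.Set Int), fr.Nodup →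
      (∀ tm ∈ fr, base.get? (((k : Int) + 1), tm) = none) →
      ∀ tm ∈ fr, (phiSolve base lengths (k + 1) fr).get? tm
        = some (fpure base lengths ((k : Int) + 1) tm) := by
  intro k
  induction k using Nat.strong_induction_on with
  | _ k ih =>
  intro fr hnd hnone tm htm
  rw [phiSolve_succ, get?_foldl_insertF_mem _ fr hnd _ tm htm]
  congr 1
  simp only [phiStep]
  have e1 : ((k + 1 : Nat) : Int) = (k : Int) + 1 := by push_cast; ring
  have e2 : ((k : Int) + 1) - 1 = (k : Int) := by ring
  rw [e1, e2]
  set L := (PySem.List.pyGet? lengths (k : Int)).getD 0 with hLdef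
  set below := phiBelow base ((k : Int) + 1) L fr with hBdef
  set prev := phiSolve base lengths k below with hPdef
  have hprev : ∀ c ∈ below, prev.get? c = some (fpure base lengths (k : Int) c) := by
    intro c hc
    have hm := (mem_phiBelow base ((k : Int) + 1) L fr c).mp (hBdef ▸ hc)
    rw [e2] at hm
    cases k with
    | zero => exact absurd hm.2.1 (by norm_num)
    | succ k' =>
      have e4 : ((k' : Int) + 1) = ((k' + 1 : Nat) : Int) := by push_cast; ring
      have hBnone : ∀ c' ∈ below, base.get? (((k' : Int) + 1), c') = none := by
        intro c' hc'
        have hm' := (mem_phiBelow base _ L fr c').mp (hBdef ▸ hc')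
        rw [e2] at hm'
        rw [e4]
        exact hm'.2.2
      have h := ih k' (by omega) below (hBdef ▸ nodup_phiBelow _ _ _ _) hBnone c hc
      rw [hPdef]
      rw [e4] at h
      exact h
  have hgv : ∀ c, (∃ time ∈ fr, c ∈ phiChildren L time) →
      phiGetv base prev ((k : Int) + 1) c = fpure base lengths (k : Int) c := by
    intro c hc
    have h := phiGetv_eq_fpure base lengths prev ((k : Int) + 1) c (by
      intro h0 hbnone
      rw [e2] at h0 hbnone ⊢
      refine hprev c ?_
      rw [hBdef, mem_phiBelow, e2]
      exact ⟨hc, by omega, hbnone⟩)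
    rw [e2] at h
    exact h
  have hbm : base.get? ((k : Int) + 1, tm) = none := hnone tm htm
  have hctm : ∃ time ∈ fr, tm ∈ phiChildren L time :=
    ⟨tm, htm, by unfold phiChildren; split_ifs <;> simp⟩
  rw [fpure_rec hbm (by omega)]
  rw [e2, ← hLdef]
  by_cases hLt : L < tm
  · simp only [if_pos hLt]
    rw [hgv tm hctm, hgv (tm - L) ⟨tm, htm, by unfold phiChildren; rw [if_pos hLt]; simp⟩]
    split_ifs <;> first | rfl | tauto
  · simp only [if_neg hLt]
    rw [hgv tm hctm]
    split_ifs <;> first | rfl | tauto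

-- B's port computes fpure
theorem phiMem_alt_eq_fpure (n t : Int) (lengths : List Int) (memo : List (Int × Int × Int × Int)) :
    phiMem_alt n t lengths memo = fpure (phiMemoDict memo) lengths n t := by
  unfold phiMem_alt
  set base := phiMemoDict memo with hbdef
  cases hget : base.get? (n, t) with
  | some v =>
    simp only [hget]
    rw [fpure_of_some hget]
  | none =>
    simp only [hget]
    by_cases hn : n ≤ 0
    · rw [if_pos hn, fpure_of_none_nonpos hget (by omega)]
    · rw [if_neg hn]
      obtain ⟨k, hk⟩ : ∃ k : Nat, n.toNat = k + 1 := ⟨n.toNat - 1, by omega⟩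
      rw [hk]
      have hfr : PySem.Set.add PySem.Set.empty t = [t] := rfl
      have he : ((k : Int) + 1) = n := by omega
      have h := phiSolve_correct base lengths k (PySem.Set.add PySem.Set.empty t)
        (by rw [hfr]; simp)
        (by intro tm htm; rw [hfr] at htm; simp at htm; subst htm; rw [he]; exact hget)
        t (by rw [hfr]; simp)
      rw [PySem.Dict.getD_eq_get?_getD, h, he]
      rfl

-- A's threaded recursion computes fpure and only writes correct values
theorem phiMemGo_correct (base : PySem.Dict (Int × Int) (Int × Int)) (lengths : List Int) :
    ∀ (fuel : Nat) (n t : Int) (m : PySem.Dict (Int × Int) (Int × Int)), n.toNat ≤ fuel →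
      (∀ k, (base.get? k).isSome = true → (m.get? k).isSome = true) →
      (∀ k v, m.get? k = some v → v = fpure base lengths k.1 k.2) →
      (phiMemGo lengths n t m).1 = fpure base lengths n t
      ∧ (∀ k, (base.get? k).isSome = true → ((phiMemGo lengths n t m).2.get? k).isSome = true)
      ∧ (∀ k v, (phiMemGo lengths n t m).2.get? k = some v → v = fpure base lengths k.1 k.2) := by
  intro fuel
  induction fuel with
  | zero =>
    intro n t m hfuel hpres hgood
    rw [phiMemGo]
    cases hm : m.get? (n, t) with
    | some v =>
      simp only []
      refine ⟨?_, hpres, hgood⟩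
      exact hgood (n, t) v hm
    | none =>
      have hnpos : ¬ 0 < n := by omega
      have hbase : base.get? (n, t) = none := by
        cases hbb : base.get? (n, t) with
        | none => rfl
        | some w =>
          have h := hpres (n, t) (by rw [hbb]; rfl)
          rw [hm] at h
          simp at h
      simp only [dif_neg hnpos]
      exact ⟨(fpure_of_none_nonpos hbase hnpos).symm, hpres, hgood⟩
  | succ fuel ihf =>
    intro n t m hfuel hpres hgood
    rw [phiMemGo]
    cases hm : m.get? (n, t) with
    | some v =>
      simp only []
      refine ⟨?_, hpres, hgood⟩
      exact hgood (n, t) v hm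
    | none =>
      have hbase : base.get? (n, t) = none := by
        cases hbb : base.get? (n, t) with
        | none => rfl
        | some w =>
          have h := hpres (n, t) (by rw [hbb]; rfl)
          rw [hm] at h
          simp at h
      by_cases hpos : 0 < n
      · simp only [dif_pos hpos]
        have hfuel1 : (n - 1).toNat ≤ fuel := by omega
        set L := (PySem.List.pyGet? lengths (n - 1)).getD 0 with hLdef
        by_cases hLt : L < t
        · simp only [if_pos hLt]
          obtain ⟨ha1, hp1, hg1⟩ := ihf (n - 1) (t - L) m hfuel1 hpres hgood
          obtain ⟨ha2, hp2, hg2⟩ :=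
            ihf (n - 1) t (phiMemGo lengths (n - 1) (t - L) m).2 hfuel1 hp1 hg1
          refine ⟨?_, ?_, ?_⟩
          · rw [ha1, ha2, fpure_rec hbase hpos]
            simp only [← hLdef, if_pos hLt]
          · intro kk hk
            rw [PySem.Dict.get?_insert]
            by_cases hkk : kk = (n, t)
            · rw [if_pos hkk]; rfl
            · rw [if_neg hkk]; exact hp2 kk hk
          · intro kk v hkv
            rw [PySem.Dict.get?_insert] at hkv
            by_cases hkk : kk = (n, t)
            · rw [if_pos hkk] at hkv
              injection hkv with hv
              subst hkk
              rw [← hv, ha1, ha2, fpure_rec hbase hpos]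
              simp only [← hLdef, if_pos hLt]
            · rw [if_neg hkk] at hkv
              exact hg2 kk v hkv
        · simp only [if_neg hLt]
          obtain ⟨ha2, hp2, hg2⟩ := ihf (n - 1) t m hfuel1 hpres hgood
          refine ⟨?_, ?_, ?_⟩
          · rw [ha2, fpure_rec hbase hpos]
            simp only [← hLdef, if_neg hLt]
          · intro kk hk
            rw [PySem.Dict.get?_insert]
            by_cases hkk : kk = (n, t)
            · rw [if_pos hkk]; rfl
            · rw [if_neg hkk]; exact hp2 kk hk
          · intro kk v hkv
            rw [PySem.Dict.get?_insert] at hkv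
            by_cases hkk : kk = (n, t)
            · rw [if_pos hkk] at hkv
              injection hkv with hv
              subst hkk
              rw [← hv, ha2, fpure_rec hbase hpos]
              simp only [← hLdef, if_neg hLt]
            · rw [if_neg hkk] at hkv
              exact hg2 kk v hkv
      · simp only [dif_neg hpos]
        exact ⟨(fpure_of_none_nonpos hbase hpos).symm, hpres, hgood⟩

theorem phiMem_eq_fpure (n t : Int) (lengths : List Int) (memo : List (Int × Int × Int × Int)) :
    phiMem n t lengths memo = fpure (phiMemoDict memo) lengths n t := by
  unfold phiMem
  have hgood : ∀ k v, (phiMemoDict memo).get? k = some v →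
      v = fpure (phiMemoDict memo) lengths k.1 k.2 := by
    intro k v hk
    exact (fpure_of_some (lengths := lengths) (by exact hk)).symm
  exact (phiMemGo_correct (phiMemoDict memo) lengths n.toNat n t (phiMemoDict memo) le_rfl
    (fun _ hk => hk) hgood).1

-- ===== VERDICT (by name: the statement is the Claim_ definition above) =====
theorem phiMem_spec : Claim_equal_phiMem := by
  intro n t lengths memo _ _
  unfold Spec_phiMem
  rw [phiMem_eq_fpure, phiMem_alt_eq_fpure]
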